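-- pv_equiv track=rewrite | github.com/MHughesDev/template | scripts/convert-blueprint-markdown.py | convert_lines
-- ===== SOURCE A (Python) =====
-- def convert_lines(raw_lines: list[str]) -> list[str]:
--     """Input: lines without trailing newlines."""
--     out: list[str] = []
--     i = 0
--     n = len(raw_lines)
--
--     def is_content_continuation(line: str) -> bool:
--         if not line.startswith(">"):
--             return False
--         stripped = line[1:].lstrip()
--         if stripped.startswith("PURPOSE:") or stripped.startswith("CONTENT:"):
--             return False
--         return True
--
--     while i < n:
--         line = raw_lines[i]
--         if line.startswith("> PURPOSE:"):
--             rest = line[len("> PURPOSE:") :].strip()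
--             out.append(f"**Purpose:** {rest}" if rest else "**Purpose:**")
--             i += 1
--             continue
--         if line.startswith("> CONTENT:"):
--             rest = line[len("> CONTENT:") :].strip()
--             if rest:
--                 out.append(rest)
--             i += 1
--             while i < n and is_content_continuation(raw_lines[i]):
--                 cont = raw_lines[i]
--                 if cont.startswith("> "):
--                     out.append(cont[2:])
--                 elif cont == ">":
--                     out.append("")
--                 elif cont.startswith(">"):
--                     out.append(cont[1:].lstrip())
--                 else:
--                     out.append(cont)
--                 i += 1
--             continue
--         out.append(line)
--         i += 1
--     return out
-- ===== SOURCE B (Python) =====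
-- def convert_lines(raw_lines: list[str]) -> list[str]:
--     """Input: lines without trailing newlines."""
--
--     def is_content_continuation(line: str) -> bool:
--         if not line.startswith(">"):
--             return False
--         stripped = line[1:].lstrip()
--         if stripped.startswith("PURPOSE:") or stripped.startswith("CONTENT:"):
--             return False
--         return True
--
--     out: list[str] = []
--     in_content = False
--     for line in raw_lines:
--         if line.startswith("> PURPOSE:"):
--             rest = line[len("> PURPOSE:") :].strip()
--             out.append(f"**Purpose:** {rest}" if rest else "**Purpose:**")
--             in_content = False
--         elif line.startswith("> CONTENT:"):
--             rest = line[len("> CONTENT:") :].strip()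
--             if rest:
--                 out.append(rest)
--             in_content = True
--         elif in_content and is_content_continuation(line):
--             if line.startswith("> "):
--                 out.append(line[2:])
--             elif line == ">":
--                 out.append("")
--             else:
--                 out.append(line[1:].lstrip())
--         else:
--             out.append(line)
--             in_content = False
--     return out
-- ===== Notes on version B (the rewrite author's own statement) =====
-- stated objective: simpler
-- what changed: Replaced the outer index loop with a nested inner while over continuation lines by a single flat for-loop over the lines that carries an in_content boolean flag.
import Mathlib
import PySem

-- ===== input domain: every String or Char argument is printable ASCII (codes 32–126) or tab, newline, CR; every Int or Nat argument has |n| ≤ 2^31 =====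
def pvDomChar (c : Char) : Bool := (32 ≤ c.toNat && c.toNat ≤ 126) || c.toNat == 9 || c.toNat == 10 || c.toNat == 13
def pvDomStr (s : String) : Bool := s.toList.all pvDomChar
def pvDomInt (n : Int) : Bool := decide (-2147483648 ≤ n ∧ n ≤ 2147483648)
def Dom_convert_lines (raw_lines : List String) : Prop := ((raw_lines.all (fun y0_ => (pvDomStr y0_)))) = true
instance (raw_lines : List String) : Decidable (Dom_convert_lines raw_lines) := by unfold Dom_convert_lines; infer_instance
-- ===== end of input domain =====

-- B replaces A's outer index loop with a nested inner while over continuation lines by one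
-- flat pass over the lines carrying an `in_content` boolean flag (objective: simpler).

-- ===== PORT A =====

-- is_content_continuation on the code points (both Pythons share this helper verbatim)
def isContContChars (cs : List Char) : Bool :=
  if !(PySem.Chars.startswith cs ">".toList) then false
  else
    let stripped := PySem.Chars.lstrip (PySem.List.slice cs (some 1) none)
    if PySem.Chars.startswith stripped "PURPOSE:".toList ||
       PySem.Chars.startswith stripped "CONTENT:".toList then false
    else true

def isContCont (line : String) : Bool := isContContChars line.toList

-- f"**Purpose:** {rest}" if rest else "**Purpose:**"  with  rest = line[10:].strip()
def purposeLine (line : String) : String :=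
  let rest := PySem.Chars.strip (PySem.List.slice line.toList (some 10) none)
  if rest ≠ [] then String.ofList ("**Purpose:** ".toList ++ rest) else "**Purpose:**"

-- the body of A's inner while: reformat one continuation line
def reformatA (cont : String) : String :=
  if PySem.Chars.startswith cont.toList "> ".toList then
    String.ofList (PySem.List.slice cont.toList (some 2) none)
  else if cont = ">" then ""
  else if PySem.Chars.startswith cont.toList ">".toList then
    String.ofList (PySem.Chars.lstrip (PySem.List.slice cont.toList (some 1) none))
  else cont

-- A's inner 'while i < n and is_content_continuation(raw_lines[i])' loop:
-- returns the reformatted continuation lines and the unconsumed remainder.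
def takeConts : List String → (List String × List String)
  | [] => ([], [])
  | l :: rest =>
    if isContCont l then
      let p := takeConts rest
      (reformatA l :: p.1, p.2)
    else ([], l :: rest)

theorem takeConts_snd_len (l : List String) : (takeConts l).2.length ≤ l.length := by
  induction l with
  | nil => simp [takeConts]
  | cons a rest ih =>
    by_cases h : isContCont a = true
    · simp only [takeConts, h, if_pos]
      exact Nat.le_succ_of_le ih
    · simp [takeConts, h]

-- A's outer while loop, consuming the list
def goA : List String → List String
  | [] => []
  | line :: rest =>
    if PySem.Chars.startswith line.toList "> PURPOSE:".toList then
      purposeLine line :: goA rest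
    else if PySem.Chars.startswith line.toList "> CONTENT:".toList then
      let r := PySem.Chars.strip (PySem.List.slice line.toList (some 10) none)
      let p := takeConts rest
      (if r ≠ [] then [String.ofList r] else []) ++ p.1 ++ goA p.2
    else line :: goA rest
  termination_by l => l.length
  decreasing_by
    · simp
    · exact Nat.lt_succ_of_le (takeConts_snd_len rest)
    · simp

def convert_lines (raw_lines : List String) : List String := goA raw_lines

-- ===== PORT B =====

-- one flat pass with the in_content flag
def goB : Bool → List String → List String
  | _, [] => []
  | inc, line :: rest =>
    if PySem.Chars.startswith line.toList "> PURPOSE:".toList then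
      purposeLine line :: goB false rest
    else if PySem.Chars.startswith line.toList "> CONTENT:".toList then
      let r := PySem.Chars.strip (PySem.List.slice line.toList (some 10) none)
      (if r ≠ [] then [String.ofList r] else []) ++ goB true rest
    else if inc && isContCont line then
      (if PySem.Chars.startswith line.toList "> ".toList then
        String.ofList (PySem.List.slice line.toList (some 2) none)
      else if line = ">" then ""
      else String.ofList (PySem.Chars.lstrip (PySem.List.slice line.toList (some 1) none)))
        :: goB true rest
    else line :: goB false rest

def convert_lines_alt (raw_lines : List String) : List String := goB false raw_lines

-- ===== PRECONDITION & SPEC =====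
def Spec_convert_lines (raw_lines : List String) (out : List String) : Prop := out = convert_lines_alt raw_lines
instance (raw_lines : List String) (out : List String) : Decidable (Spec_convert_lines raw_lines out) := by unfold Spec_convert_lines; infer_instance

-- ===== CLAIM (what is proved, stated in full; the proofs are below) =====
def Claim_equal_convert_lines : Prop := ∀ (raw_lines : List String), Dom_convert_lines raw_lines → Spec_convert_lines raw_lines (convert_lines raw_lines)

-- ===== LEMMAS AND PROOFS =====

-- a "> PURPOSE:"/"> CONTENT:" header is never a content continuation
theorem not_cont_purpose (t : List Char) :
    isContContChars ('>' :: ' ' :: 'P' :: 'U' :: 'R' :: 'P' :: 'O' :: 'S' :: 'E' :: ':' :: t) = false := by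
  simp [isContContChars, PySem.Chars.startswith, PySem.List.slice, PySem.Chars.lstrip,
    PySem.Chars.isspace]

theorem not_cont_content (t : List Char) :
    isContContChars ('>' :: ' ' :: 'C' :: 'O' :: 'N' :: 'T' :: 'E' :: 'N' :: 'T' :: ':' :: t) = false := by
  simp [isContContChars, PySem.Chars.startswith, PySem.List.slice, PySem.Chars.lstrip,
    PySem.Chars.isspace]

theorem not_cont_of_purpose (line : String)
    (hs : PySem.Chars.startswith line.toList "> PURPOSE:".toList = true) :
    isContCont line = false := by
  rw [PySem.Chars.startswith_iff] at hs
  obtain ⟨t, ht⟩ := hs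
  unfold isContCont
  rw [← ht]
  exact not_cont_purpose t

theorem not_cont_of_content (line : String)
    (hs : PySem.Chars.startswith line.toList "> CONTENT:".toList = true) :
    isContCont line = false := by
  rw [PySem.Chars.startswith_iff] at hs
  obtain ⟨t, ht⟩ := hs
  unfold isContCont
  rw [← ht]
  exact not_cont_content t

-- on a continuation line (which starts with ">") reformatA's dead last branch never
-- fires, so it agrees with B's three-way reformat
theorem reformat_eq (line : String) (hc : isContCont line = true) :
    reformatA line =
      (if PySem.Chars.startswith line.toList "> ".toList then
        String.ofList (PySem.List.slice line.toList (some 2) none)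
      else if line = ">" then ""
      else String.ofList (PySem.Chars.lstrip (PySem.List.slice line.toList (some 1) none))) := by
  simp only [isContCont] at hc
  simp [isContContChars] at hc
  have hgt : PySem.Chars.startswith line.toList ">".toList = true := by simpa using hc.1
  unfold reformatA
  rw [if_pos hgt]

-- the main invariant: goA equals goB with the flag false, and the tail of a
-- CONTENT block (inner-while output ++ remainder) equals goB with the flag true
theorem goA_eq_goB (l : List String) :
    goA l = goB false l ∧ (takeConts l).1 ++ goA (takeConts l).2 = goB true l := by
  induction l with
  | nil => constructor <;> simp [goA, goB, takeConts]
  | cons line rest ih =>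
    by_cases hp : PySem.Chars.startswith line.toList "> PURPOSE:".toList = true
    · have hnc := not_cont_of_purpose line hp
      constructor
      · simp only [goA, goB, hp, if_pos, ih.1]
      · simp only [takeConts, hnc, Bool.false_eq_true, if_neg, not_false_iff, List.nil_append]
        simp only [goA, goB, hp, if_pos, ih.1]
    · by_cases hcnt : PySem.Chars.startswith line.toList "> CONTENT:".toList = true
      · have hnc := not_cont_of_content line hcnt
        have hmain : goA (line :: rest) = goB true (line :: rest) ∧
            goA (line :: rest) = goB false (line :: rest) := by
          have hA : goA (line :: rest) =
              (if PySem.Chars.strip (PySem.List.slice line.toList (some 10) none) ≠ [] then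
                [String.ofList (PySem.Chars.strip (PySem.List.slice line.toList (some 10) none))]
              else []) ++ ((takeConts rest).1 ++ goA (takeConts rest).2) := by
            simp only [goA, hp, Bool.false_eq_true, if_neg, not_false_iff, hcnt, if_pos,
              List.append_assoc]
          constructor <;>
          · rw [hA, ih.2]
            simp only [goB, hp, Bool.false_eq_true, if_neg, not_false_iff, hcnt, if_pos]
        refine ⟨hmain.2, ?_⟩
        simpa only [takeConts, hnc, Bool.false_eq_true, if_neg, not_false_iff,
          List.nil_append] using hmain.1
      · constructor
        · simp only [goA, goB, hp, hcnt, if_neg, if_neg,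
            not_false_iff, Bool.false_eq_true, Bool.false_and, ih.1]
        · by_cases hc : isContCont line = true
          · simp only [takeConts, hc, if_pos]
            simp only [goB, hp, hcnt, Bool.false_eq_true, if_neg, not_false_iff, hc,
              Bool.true_and, if_pos, List.cons_append]
            rw [reformat_eq line hc, ih.2]
          · simp only [Bool.not_eq_true] at hc
            simp only [takeConts, hc, Bool.false_eq_true, if_neg, not_false_iff,
              List.nil_append]
            simp only [goA, goB, hp, hcnt, hc, Bool.false_eq_true, Bool.and_false,
              if_neg, not_false_iff, ih.1]

-- ===== VERDICT (by name: the statement is the Claim_ definition above) =====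
theorem convert_lines_spec : Claim_equal_convert_lines := by
  intro raw_lines _
  unfold Spec_convert_lines convert_lines convert_lines_alt
  exact (goA_eq_goB raw_lines).1
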